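-- pv_equiv track=rewrite | github.com/jon-alamo/hisense-ac-remote-dg11l1 | dg11l1/decoder.py | deserialize_bit_sequence
-- ===== SOURCE A (Python) =====
-- def deserialize_bit_sequence(meaning_message: list):
--     byte_seq = []
--     byte_bits = ''
--     for i, bit in enumerate(meaning_message):
--         byte_bits += str(bit)
--         if (i+1) % 8 == 0:
--             byte_seq.append(byte_bits)
--             byte_bits = ''
--     return byte_seq
-- ===== SOURCE B (Python) =====
-- def deserialize_bit_sequence(meaning_message: list):
--     byte_seq = []
--     i = 0
--     while i + 8 <= len(meaning_message):
--         byte_seq.append(''.join(str(b) for b in meaning_message[i:i+8]))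
--         i += 8
--     return byte_seq
-- ===== Notes on version B (the rewrite author's own statement) =====
-- stated objective: simpler
-- what changed: Replaced the per-element accumulator with a modulo counter by an index loop stepping 8 at a time that joins each whole 8-element slice directly; the i+8<=len guard drops the trailing partial group.
import Mathlib
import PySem

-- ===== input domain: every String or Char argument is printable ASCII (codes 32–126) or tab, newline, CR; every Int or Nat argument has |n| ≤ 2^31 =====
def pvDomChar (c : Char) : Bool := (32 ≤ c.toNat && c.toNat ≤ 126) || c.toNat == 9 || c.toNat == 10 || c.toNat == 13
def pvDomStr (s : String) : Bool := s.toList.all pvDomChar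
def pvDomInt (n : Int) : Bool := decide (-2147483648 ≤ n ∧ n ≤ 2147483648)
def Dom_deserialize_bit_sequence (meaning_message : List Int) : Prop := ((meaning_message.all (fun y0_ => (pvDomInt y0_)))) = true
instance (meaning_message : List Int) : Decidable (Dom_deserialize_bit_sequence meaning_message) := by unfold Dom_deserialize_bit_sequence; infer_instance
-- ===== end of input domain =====

-- B replaces A's per-element accumulator with a modulo counter by recursive take-8/drop-8 chunking (objective: simpler).
-- ===== PORT A =====
-- A's `for i, bit in enumerate(...)` loop, carried as a structural recursion over the list with the
-- explicit index i and the same state (byte_seq, byte_bits).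
def pvALoop (l : List Int) (i : Nat) (byte_seq : List String) (byte_bits : String) : List String :=
  match l with
  | [] => byte_seq
  | bit :: rest =>
    let bb := byte_bits ++ PySem.Int.toStr bit
    if (i + 1) % 8 = 0 then pvALoop rest (i + 1) (byte_seq ++ [bb]) ""
    else pvALoop rest (i + 1) byte_seq bb

def deserialize_bit_sequence (meaning_message : List Int) : List String :=
  pvALoop meaning_message 0 [] ""

-- ===== PORT B =====
-- B's while loop over the index i in steps of 8; meaning_message[i:i+8] with 0 <= i is exactly
-- (drop i).take 8 (PySem.List.slice_natCast_add); ''.join of strings is String.join.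
def pvBLoop (l : List Int) (i : Nat) (byte_seq : List String) : List String :=
  if i + 8 ≤ l.length then
    pvBLoop l (i + 8) (byte_seq ++ [String.join (((l.drop i).take 8).map PySem.Int.toStr)])
  else byte_seq
termination_by l.length - i
decreasing_by omega

def deserialize_bit_sequence_alt (meaning_message : List Int) : List String :=
  pvBLoop meaning_message 0 []

-- ===== PRECONDITION & SPEC =====
def Spec_deserialize_bit_sequence (meaning_message : List Int) (out : List String) : Prop := out = deserialize_bit_sequence_alt meaning_message
instance (meaning_message : List Int) (out : List String) : Decidable (Spec_deserialize_bit_sequence meaning_message out) := by unfold Spec_deserialize_bit_sequence; infer_instance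

-- ===== CLAIM (what is proved, stated in full; the proofs are below) =====
def Claim_equal_deserialize_bit_sequence : Prop := ∀ (meaning_message : List Int), Dom_deserialize_bit_sequence meaning_message → Spec_deserialize_bit_sequence meaning_message (deserialize_bit_sequence meaning_message)

-- ===== LEMMAS AND PROOFS =====

-- ===== VERDICT (by name: the statement is the Claim_ definition above) =====
-- Proof-side helper: the list of whole-byte chunks, by recursive take-8/drop-8.
def pvChunks (l : List Int) : List String :=
  if l.length < 8 then []
  else String.join ((l.take 8).map PySem.Int.toStr) :: pvChunks (l.drop 8)
termination_by l.length
decreasing_by simp; omega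

-- Short tail: fewer than 8 remaining elements starting at index 8*n + k never hit the byte boundary.
lemma pvALoop_short (l : List Int) (n : Nat) : ∀ (k : Nat) (acc : List String) (bb : String),
    k + l.length < 8 → pvALoop l (8 * n + k) acc bb = acc := by
  induction l with
  | nil => intro k acc bb _; rfl
  | cons a t ih =>
    intro k acc bb h
    simp only [List.length_cons] at h
    have hmod : (8 * n + k + 1) % 8 = k + 1 := by omega
    simp only [pvALoop, hmod]
    rw [if_neg (by omega)]
    have := ih (k + 1) acc (bb ++ PySem.Int.toStr a) (by omega)
    simpa [Nat.add_assoc] using this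

-- One whole 8-element block of A's loop, starting at a multiple of 8 with an empty byte_bits.
lemma pvALoop_block (a1 a2 a3 a4 a5 a6 a7 a8 : Int) (t : List Int) (n : Nat)
    (acc : List String) :
    pvALoop (a1 :: a2 :: a3 :: a4 :: a5 :: a6 :: a7 :: a8 :: t) (8 * n) acc "" =
      pvALoop t (8 * (n + 1))
        (acc ++ [String.join ([a1, a2, a3, a4, a5, a6, a7, a8].map PySem.Int.toStr)]) "" := by
  have h1 : (8 * n + 1) % 8 = 1 := by omega
  have h2 : (8 * n + 1 + 1) % 8 = 2 := by omega
  have h3 : (8 * n + 1 + 1 + 1) % 8 = 3 := by omega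
  have h4 : (8 * n + 1 + 1 + 1 + 1) % 8 = 4 := by omega
  have h5 : (8 * n + 1 + 1 + 1 + 1 + 1) % 8 = 5 := by omega
  have h6 : (8 * n + 1 + 1 + 1 + 1 + 1 + 1) % 8 = 6 := by omega
  have h7 : (8 * n + 1 + 1 + 1 + 1 + 1 + 1 + 1) % 8 = 7 := by omega
  have h9 : 8 * n + 1 + 1 + 1 + 1 + 1 + 1 + 1 + 1 = 8 * (n + 1) := by ring
  simp [pvALoop, h1, h2, h3, h4, h5, h6, h7, h9, String.join]

lemma pvALoop_main (l : List Int) (n : Nat) (acc : List String) :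
    pvALoop l (8 * n) acc "" = acc ++ pvChunks l := by
  by_cases h : l.length < 8
  · rw [pvChunks, if_pos h]
    have := pvALoop_short l n 0 acc "" (by omega)
    simpa using this
  · obtain ⟨a1, a2, a3, a4, a5, a6, a7, a8, t, rfl⟩ :
        ∃ a1 a2 a3 a4 a5 a6 a7 a8 t, l = a1 :: a2 :: a3 :: a4 :: a5 :: a6 :: a7 :: a8 :: t := by
      rcases l with _|⟨a1,_|⟨a2,_|⟨a3,_|⟨a4,_|⟨a5,_|⟨a6,_|⟨a7,_|⟨a8,t⟩⟩⟩⟩⟩⟩⟩⟩ <;>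
        first
          | (exfalso; simp only [List.length_cons, List.length_nil] at h; omega)
          | exact ⟨a1, a2, a3, a4, a5, a6, a7, a8, t, rfl⟩
    rw [pvALoop_block, pvALoop_main t (n + 1)]
    conv_rhs => rw [pvChunks]
    rw [if_neg h]
    simp
termination_by l.length

lemma pvBLoop_eq (l : List Int) (i : Nat) (out : List String) :
    pvBLoop l i out = out ++ pvChunks (l.drop i) := by
  by_cases h : i + 8 ≤ l.length
  · rw [pvBLoop, if_pos h, pvBLoop_eq l (i + 8)]
    conv_rhs => rw [pvChunks]
    rw [if_neg (by simp; omega)]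
    simp [List.drop_drop]
  · rw [pvBLoop, if_neg h]
    rw [pvChunks, if_pos (by simp; omega)]
    simp
termination_by l.length - i

-- ===== VERDICT (by name: the statement is the Claim_ definition above) =====

theorem deserialize_bit_sequence_spec : Claim_equal_deserialize_bit_sequence := by
  intro l _
  unfold Spec_deserialize_bit_sequence deserialize_bit_sequence deserialize_bit_sequence_alt
  have hA := pvALoop_main l 0 []
  have hB := pvBLoop_eq l 0 []
  simp at hA hB
  rw [hA, hB]
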